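-- pv_equiv track=rewrite | github.com/nolanwinsman/scripts | movie_renamer.py | text_after_year
-- ===== SOURCE A (Python) =====
-- def text_after_year(name):
--     """If the string file has four numbers in a row representing a year,
--        adds parenthesis around the four numbers.
--        Batman 1989xRAREx1080   ---->   Batman
--     """
--     pointer = 0
--     year = 0
--     for c in name:
--         pointer += 1
--         if c.isdigit():
--             year += 1
--         else:
--             year = 0
--         if year == 4:
--             pointer = pointer
--             return name[:pointer]
--     return name
-- ===== SOURCE B (Python) =====
-- def text_after_year(name):
--     """Run-based scan: split the name into maximal runs of digit / non-digit
--     characters; at the first digit run of length >= 4, cut after its 4th digit."""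
--     n = len(name)
--     pos = 0
--     while pos < n:
--         d = name[pos].isdigit()
--         run = 1
--         while pos + run < n and name[pos + run].isdigit() == d:
--             run += 1
--         if d and run >= 4:
--             return name[:pos + 4]
--         pos += run
--     return name
-- ===== Notes on version B (the rewrite author's own statement) =====
-- stated objective: alternative
-- what changed: Replaces the per-character counter (increment-or-reset 'year' checked against 4 after every char) by a two-level run scan: an outer loop over maximal runs of same isdigit-class characters, cutting at pos+4 when a digit run of length >= 4 is found.
import Mathlib
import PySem

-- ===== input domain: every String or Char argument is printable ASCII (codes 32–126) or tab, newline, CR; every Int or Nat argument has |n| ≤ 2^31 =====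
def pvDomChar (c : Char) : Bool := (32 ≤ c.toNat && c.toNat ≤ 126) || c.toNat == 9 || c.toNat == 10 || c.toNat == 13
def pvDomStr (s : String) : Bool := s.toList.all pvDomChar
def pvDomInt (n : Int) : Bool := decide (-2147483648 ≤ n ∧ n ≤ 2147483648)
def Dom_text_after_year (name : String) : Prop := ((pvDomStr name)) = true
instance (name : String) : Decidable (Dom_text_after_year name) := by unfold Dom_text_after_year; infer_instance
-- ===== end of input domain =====

-- B replaces A's per-character run counter by an outer scan over maximal isdigit-class runs (alternative decomposition, same cost).

-- ===== PORT A =====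
-- the for-loop with early return: pointer/year state, returns the cut position at the 4th consecutive digit
def aGo : List Char → Nat → Nat → Option Nat
  | [], _, _ => none
  | c :: cs, pointer, year =>
    let pointer' := pointer + 1
    let year' := if PySem.Chars.isdigit c then year + 1 else 0
    if year' = 4 then some pointer' else aGo cs pointer' year'

def text_after_year (name : String) : String :=
  match aGo name.toList 0 0 with
  | some pointer => PySem.Str.slice name none (some (pointer : Int))
  | none => name

-- ===== PORT B =====
-- Source B's index-based outer/inner while loop, transcribed as recursion on the suffix name[pos:]
-- (the inner counting loop 'while … name[pos+run].isdigit() == d: run += 1' is the length of the matching prefix)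
def altScan : List Char → Nat → Option Nat
  | [], _ => none
  | c :: cs, pos =>
    let d := PySem.Chars.isdigit c
    let run := 1 + (cs.takeWhile (fun x => PySem.Chars.isdigit x == d)).length
    if d && decide (4 ≤ run) then some (pos + 4)
    else altScan ((c :: cs).drop run) (pos + run)
termination_by cs _ => cs.length
decreasing_by simp [List.length_drop]

def text_after_year_alt (name : String) : String :=
  match altScan name.toList 0 with
  | some cut => PySem.Str.slice name none (some (cut : Int))
  | none => name

-- ===== PRECONDITION & SPEC =====
def Spec_text_after_year (name : String) (out : String) : Prop := out = text_after_year_alt name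
instance (name : String) (out : String) : Decidable (Spec_text_after_year name out) := by unfold Spec_text_after_year; infer_instance

-- ===== CLAIM (what is proved, stated in full; the proofs are below) =====
def Claim_equal_text_after_year : Prop := ∀ (name : String), Dom_text_after_year name → Spec_text_after_year name (text_after_year name)

-- ===== LEMMAS AND PROOFS =====

-- a leading non-digit resets 'year', so the incoming year is irrelevant
theorem aGo_reset (c : Char) (cs : List Char) (p y y' : Nat)
    (h : PySem.Chars.isdigit c = false) : aGo (c :: cs) p y = aGo (c :: cs) p y' := by
  simp [aGo, h]

-- a run of non-digits just advances the pointer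
theorem aGo_nondigit_run : ∀ (ns : List Char) (rest : List Char) (p : Nat),
    (∀ x ∈ ns, PySem.Chars.isdigit x = false) →
    aGo (ns ++ rest) p 0 = aGo rest (p + ns.length) 0 := by
  intro ns
  induction ns with
  | nil => intro rest p _; simp
  | cons a ns ih =>
    intro rest p h
    have ha : PySem.Chars.isdigit a = false := h a (by simp)
    have hx : ∀ x ∈ ns, PySem.Chars.isdigit x = false := fun x hm => h x (by simp [hm])
    simp only [List.cons_append, aGo, ha, if_false, Bool.false_eq_true]
    rw [ih rest (p + 1) hx, if_neg (by omega)]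
    congr 1
    simp only [List.length_cons]
    omega

-- a run of digits entered with year = y < 4: either the 4th digit is reached inside it, or the whole run is consumed
theorem aGo_digit_run : ∀ (ds : List Char) (rest : List Char) (p y : Nat),
    (∀ x ∈ ds, PySem.Chars.isdigit x = true) → y < 4 →
    (∀ q y', aGo rest q y' = aGo rest q 0) →
    aGo (ds ++ rest) p y =
      if 4 ≤ y + ds.length then some (p + (4 - y)) else aGo rest (p + ds.length) 0 := by
  intro ds
  induction ds with
  | nil =>
    intro rest p y _ hy hrest
    simp only [List.nil_append, List.length_nil, Nat.add_zero]
    rw [if_neg (by omega)]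
    exact hrest p y
  | cons a ds ih =>
    intro rest p y h hy hrest
    have ha : PySem.Chars.isdigit a = true := h a (by simp)
    have hx : ∀ x ∈ ds, PySem.Chars.isdigit x = true := fun x hm => h x (by simp [hm])
    simp only [List.cons_append, aGo, ha, if_true, List.length_cons]
    by_cases h4 : y + 1 = 4
    · rw [if_pos h4, if_pos (by omega)]
      congr 1; omega
    · rw [if_neg h4, ih rest (p + 1) (y + 1) hx (by omega) hrest]
      by_cases hc : 4 ≤ y + 1 + ds.length
      · rw [if_pos hc, if_pos (by omega)]
        congr 1; omega
      · rw [if_neg hc, if_neg (by omega)]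
        congr 1; omega

theorem main_scan : ∀ (n : Nat) (cs : List Char), cs.length ≤ n → ∀ (p : Nat),
    aGo cs p 0 = altScan cs p := by
  intro n
  induction n with
  | zero =>
    intro cs hlen p
    have : cs = [] := List.eq_nil_of_length_eq_zero (Nat.le_zero.mp hlen)
    subst this; simp [aGo, altScan]
  | succ n ih =>
    intro cs hlen p
    cases cs with
    | nil => simp [aGo, altScan]
    | cons c cs =>
      have hcs : cs.length ≤ n := by simpa using hlen
      cases hd : PySem.Chars.isdigit c with
      | true =>
        set t := cs.takeWhile (fun x => PySem.Chars.isdigit x == true) with ht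
        set r := cs.dropWhile (fun x => PySem.Chars.isdigit x == true) with hr
        have htr : t ++ r = cs := by rw [ht, hr]; exact List.takeWhile_append_dropWhile
        have hrlen : r.length ≤ n := le_trans (hr ▸ List.length_dropWhile_le _ _) hcs
        have hdig : ∀ x ∈ c :: t, PySem.Chars.isdigit x = true := by
          intro x hx
          rcases List.mem_cons.mp hx with h | h
          · subst h; exact hd
          · rw [ht] at h; simpa using List.mem_takeWhile_imp h
        have hrest : ∀ q y', aGo r q y' = aGo r q 0 := by
          intro q y'
          cases hcr : r with
          | nil => rfl
          | cons h tl =>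
            have hdw : cs.dropWhile (fun x => PySem.Chars.isdigit x == true) = h :: tl := by
              rw [← hr]; exact hcr
            have hne : cs.dropWhile (fun x => PySem.Chars.isdigit x == true) ≠ [] := by
              rw [hdw]; simp
            have hh := List.head_dropWhile_not (fun x => PySem.Chars.isdigit x == true) hne
            simp only [hdw, List.head_cons] at hh
            exact aGo_reset h tl q y' 0 (by simpa using hh)
        have hdrop : (c :: cs).drop (1 + t.length) = r := by
          rw [show 1 + t.length = t.length + 1 from by omega, List.drop_succ_cons, ← htr]
          exact List.drop_left
        have lhs : aGo (c :: cs) p 0 =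
            if 4 ≤ 0 + (c :: t).length then some (p + (4 - 0))
            else aGo r (p + (c :: t).length) 0 := by
          conv_lhs => rw [← htr]
          exact aGo_digit_run (c :: t) r p 0 hdig (by omega) hrest
        rw [lhs, altScan]
        simp only [hd, Bool.true_and, decide_eq_true_eq, ← ht, List.length_cons,
          Nat.zero_add, Nat.sub_zero]
        by_cases h4 : 4 ≤ 1 + t.length
        · rw [if_pos (show 4 ≤ t.length + 1 by omega), if_pos h4]
        · rw [if_neg (show ¬ 4 ≤ t.length + 1 by omega), if_neg h4, hdrop,
            show p + (t.length + 1) = p + (1 + t.length) from by omega]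
          exact ih r hrlen _
      | false =>
        set t := cs.takeWhile (fun x => PySem.Chars.isdigit x == false) with ht
        set r := cs.dropWhile (fun x => PySem.Chars.isdigit x == false) with hr
        have htr : t ++ r = cs := by rw [ht, hr]; exact List.takeWhile_append_dropWhile
        have hrlen : r.length ≤ n := le_trans (hr ▸ List.length_dropWhile_le _ _) hcs
        have hnd : ∀ x ∈ c :: t, PySem.Chars.isdigit x = false := by
          intro x hx
          rcases List.mem_cons.mp hx with h | h
          · subst h; exact hd
          · rw [ht] at h; simpa using List.mem_takeWhile_imp h
        have hdrop : (c :: cs).drop (1 + t.length) = r := by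
          rw [show 1 + t.length = t.length + 1 from by omega, List.drop_succ_cons, ← htr]
          exact List.drop_left
        have lhs : aGo (c :: cs) p 0 = aGo r (p + (c :: t).length) 0 := by
          conv_lhs => rw [← htr]
          exact aGo_nondigit_run (c :: t) r p hnd
        rw [lhs, altScan]
        simp only [hd, Bool.false_and, Bool.false_eq_true, if_false, ← ht, List.length_cons]
        rw [hdrop, show p + (t.length + 1) = p + (1 + t.length) from by omega]
        exact ih r hrlen _

-- ===== VERDICT (by name: the statement is the Claim_ definition above) =====
theorem text_after_year_spec : Claim_equal_text_after_year := by
  intro name _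
  unfold Spec_text_after_year text_after_year text_after_year_alt
  rw [main_scan name.toList.length name.toList le_rfl 0]
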